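-- pv_equiv track=rewrite | github.com/olegsany4/DevForge-MAS | tools/md_autofix.py | _dedupe_trailing_blanklines
-- ===== SOURCE A (Python) =====
-- def _dedupe_trailing_blanklines(lines: list[str]) -> list[str]:
--     """Ensure at most one trailing blank line at EOF."""
--     i = len(lines) - 1
--     while i >= 0 and lines[i].strip() == "":
--         i -= 1
--     tail_blanks = len(lines) - 1 - i
--     if tail_blanks <= 1:
--         return lines
--     return lines[: i + 2]
-- ===== SOURCE B (Python) =====
-- def _dedupe_trailing_blanklines(lines: list[str]) -> list[str]:
--     """Ensure at most one trailing blank line at EOF."""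
--     idx = -1
--     for j, line in enumerate(lines):
--         if line.strip() != "":
--             idx = j
--     if len(lines) - 1 - idx <= 1:
--         return lines
--     return lines[: idx + 2]
-- ===== Notes on version B (the rewrite author's own statement) =====
-- stated objective: alternative
-- what changed: Replaces A's backward while-loop from the end with a single forward enumerate pass that records the index of the last non-blank line, then applies the same tail-blank cutoff.
import Mathlib
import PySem

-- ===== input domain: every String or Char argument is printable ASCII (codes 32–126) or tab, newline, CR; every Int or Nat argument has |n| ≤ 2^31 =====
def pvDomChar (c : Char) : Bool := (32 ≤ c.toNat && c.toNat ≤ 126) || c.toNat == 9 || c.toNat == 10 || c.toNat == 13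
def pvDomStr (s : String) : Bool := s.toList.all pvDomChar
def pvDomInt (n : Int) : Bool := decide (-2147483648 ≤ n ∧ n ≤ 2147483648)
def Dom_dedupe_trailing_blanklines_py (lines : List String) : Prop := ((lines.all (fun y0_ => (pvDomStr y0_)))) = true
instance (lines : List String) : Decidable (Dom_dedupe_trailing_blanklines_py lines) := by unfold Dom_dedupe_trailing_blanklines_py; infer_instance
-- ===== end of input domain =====

-- B replaces A's backward while-loop with a single forward enumerate pass recording the last non-blank index (alternative decomposition, same cost).


-- ===== PORT A =====
-- the while-loop 'while i >= 0 and lines[i].strip() == "": i -= 1'; argument k is i+1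
-- (index k is always in range, so lines.getD k "" is exact for lines[i])
def pvALoop (lines : List String) : Nat → Int
  | 0 => -1
  | k+1 => if PySem.Str.strip (lines.getD k "") == "" then pvALoop lines k else (k : Int)

def dedupe_trailing_blanklines_py (lines : List String) : List String :=
  let i := pvALoop lines lines.length
  let tail_blanks : Int := (lines.length : Int) - 1 - i
  if tail_blanks ≤ 1 then lines
  else PySem.List.slice lines none (some (i + 2))

-- ===== PORT B =====
def dedupe_trailing_blanklines_py_alt (lines : List String) : List String :=
  let idx := (PySem.List.enumerate lines 0).foldl
    (fun acc p => if PySem.Str.strip p.2 != "" then p.1 else acc) (-1 : Int)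
  if (lines.length : Int) - 1 - idx ≤ 1 then lines
  else PySem.List.slice lines none (some (idx + 2))

-- ===== PRECONDITION & SPEC =====
def Spec_dedupe_trailing_blanklines_py (lines : List String) (out : List String) : Prop := out = dedupe_trailing_blanklines_py_alt lines
instance (lines : List String) (out : List String) : Decidable (Spec_dedupe_trailing_blanklines_py lines out) := by unfold Spec_dedupe_trailing_blanklines_py; infer_instance

-- ===== CLAIM (what is proved, stated in full; the proofs are below) =====
def Claim_equal_dedupe_trailing_blanklines_py : Prop := ∀ (lines : List String), Dom_dedupe_trailing_blanklines_py lines → Spec_dedupe_trailing_blanklines_py lines (dedupe_trailing_blanklines_py lines)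

-- ===== LEMMAS AND PROOFS =====

-- pvALoop only reads indices below its argument, so appending past them changes nothing
theorem pvALoop_append (lines : List String) (x : String) (k : Nat) (h : k ≤ lines.length) :
    pvALoop (lines ++ [x]) k = pvALoop lines k := by
  induction k with
  | zero => rfl
  | succ k ih =>
    have hk : k < lines.length := by omega
    simp [pvALoop, List.getD, List.getElem?_append_left hk, ih (by omega)]

-- the forward fold over enumerate computes the same last-non-blank index as A's backward loop
theorem fold_eq_loop (lines : List String) :
    (PySem.List.enumerate lines 0).foldl
      (fun acc p => if PySem.Str.strip p.2 != "" then p.1 else acc) (-1 : Int)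
    = pvALoop lines lines.length := by
  induction lines using List.reverseRecOn with
  | nil => rfl
  | append_singleton xs x ih =>
    rw [PySem.List.enumerate_append, List.foldl_append]
    simp only [PySem.List.enumerate_cons, PySem.List.enumerate_nil, List.foldl_cons, List.foldl_nil]
    rw [ih]
    have hlen : (xs ++ [x]).length = xs.length + 1 := by simp
    rw [hlen]
    by_cases hb : PySem.Str.strip x = ""
    · simp [pvALoop, List.getD, hb, pvALoop_append xs x xs.length le_rfl]
    · simp [pvALoop, List.getD, hb]

-- ===== VERDICT (by name: the statement is the Claim_ definition above) =====
theorem dedupe_trailing_blanklines_py_spec : Claim_equal_dedupe_trailing_blanklines_py := by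
  intro lines _
  unfold Spec_dedupe_trailing_blanklines_py dedupe_trailing_blanklines_py dedupe_trailing_blanklines_py_alt
  rw [fold_eq_loop]
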